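-- pv_equiv track=rewrite | github.com/Lu-Chengyu/factory-logistics-package-solutions-evaluation | TLP_Solution_V2.1.py | swerve_by_group
-- ===== SOURCE A (Python) =====
-- def del_rdd(list=[]):
--     list_temp = []
--     for i, item in enumerate(list):
--         if item not in list_temp:
--             list_temp.append(item)
--
--     return list_temp
--
-- def swerve_by_group(some_box=[]):
--     some_box_type = del_rdd(some_box)
--     count_type = len(some_box_type)
--     queue1 = []
--     for num in range(2 ** count_type):
--         new_box_list = []
--         for i in range(count_type):
--             for j in range(len(some_box)):
--                 if some_box[j] == some_box_type[i]:
--                     if 1 << i & num: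
--                         new_box_list.append(list(reversed(some_box[j])))
--                     else:
--                         new_box_list.append(list(some_box[j]))
--
--         queue1.append(new_box_list)
--
--     return queue1
-- ===== SOURCE B (Python) =====
-- def swerve_by_group(some_box=[]):
--     types = []
--     for b in some_box:
--         if b not in types:
--             types.append(b)
--     blocks = [([list(t) for _ in range(some_box.count(t))],
--                [t[::-1] for _ in range(some_box.count(t))]) for t in types]
--     result = []
--     for num in range(2 ** len(types)):
--         combo = []
--         for i, (straight, rev) in enumerate(blocks):
--             combo += rev if (num >> i) & 1 else straight
--         result.append(combo)
--     return result
-- ===== Notes on version B (the rewrite author's own statement) =====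
-- stated objective: faster
-- what changed: B precomputes per distinct type its straight and reversed occurrence blocks once, then assembles each mask's list by concatenating the chosen precomputed blocks, instead of A's rescan of all boxes for every (mask, type) pair with a fresh copy per element.
import Mathlib
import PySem

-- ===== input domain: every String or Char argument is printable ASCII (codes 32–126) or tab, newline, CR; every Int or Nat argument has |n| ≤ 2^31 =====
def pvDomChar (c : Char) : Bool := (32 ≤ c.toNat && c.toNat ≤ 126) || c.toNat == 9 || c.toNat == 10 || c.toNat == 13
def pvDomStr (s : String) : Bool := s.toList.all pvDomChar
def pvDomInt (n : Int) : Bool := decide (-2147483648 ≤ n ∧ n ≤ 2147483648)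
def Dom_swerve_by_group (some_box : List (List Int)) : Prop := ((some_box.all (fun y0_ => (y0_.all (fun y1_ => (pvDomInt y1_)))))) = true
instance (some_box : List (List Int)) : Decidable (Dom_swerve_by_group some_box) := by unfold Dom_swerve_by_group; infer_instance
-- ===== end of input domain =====

-- B precomputes per distinct type its straight and reversed occurrence blocks once and
-- concatenates the chosen blocks per mask, instead of A's rescan of all boxes per (mask, type);
-- equivalence is about the RETURN VALUE (B's output may share inner list objects across masks).

-- ===== PORT A =====
def del_rdd (list_ : List (List Int)) : List (List Int) :=
  list_.foldl (fun list_temp item => if item ∈ list_temp then list_temp else list_temp ++ [item]) []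

def swerve_by_group (some_box : List (List Int)) : List (List (List Int)) :=
  let some_box_type := del_rdd some_box
  let count_type := some_box_type.length
  (List.range (2 ^ count_type)).foldl (fun queue1 num =>
    let new_box_list := some_box_type.zipIdx.foldl (fun nbl ti =>
      some_box.foldl (fun nbl2 bj =>
        if bj = ti.1 then
          (if Nat.testBit num ti.2 then nbl2 ++ [bj.reverse] else nbl2 ++ [bj])
        else nbl2) nbl) []
    queue1 ++ [new_box_list]) []

-- ===== PORT B =====
def swerve_by_group_alt (some_box : List (List Int)) : List (List (List Int)) :=
  let types := some_box.foldl (fun ts b => if b ∈ ts then ts else ts ++ [b]) []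
  let blocks := types.map (fun t =>
    (List.replicate (some_box.count t) t, List.replicate (some_box.count t) t.reverse))
  (List.range (2 ^ types.length)).map (fun num =>
    blocks.zipIdx.foldl (fun combo p =>
      combo ++ (if Nat.testBit num p.2 then p.1.2 else p.1.1)) [])

-- ===== PRECONDITION & SPEC =====
def Spec_swerve_by_group (some_box : List (List Int)) (out : List (List (List Int))) : Prop := out = swerve_by_group_alt some_box
instance (some_box : List (List Int)) (out : List (List (List Int))) : Decidable (Spec_swerve_by_group some_box out) := by unfold Spec_swerve_by_group; infer_instance

-- ===== CLAIM (what is proved, stated in full; the proofs are below) =====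
def Claim_equal_swerve_by_group : Prop := ∀ (some_box : List (List Int)), Dom_swerve_by_group some_box → Spec_swerve_by_group some_box (swerve_by_group some_box)

-- ===== LEMMAS AND PROOFS =====

-- A's scan over all boxes for one type t collects exactly count-many copies of the chosen list.
theorem inner_scan_eq (some_box : List (List Int)) (t : List Int) (num i : Nat) (acc : List (List Int)) :
    some_box.foldl (fun nbl2 bj =>
        if bj = t then
          (if Nat.testBit num i then nbl2 ++ [bj.reverse] else nbl2 ++ [bj])
        else nbl2) acc
      = acc ++ List.replicate (some_box.count t) (if Nat.testBit num i then t.reverse else t) := by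
  induction some_box generalizing acc with
  | nil => simp
  | cons x xs ih =>
    rw [List.foldl_cons]
    by_cases h : x = t
    · subst h
      rw [if_pos rfl,
        show (if Nat.testBit num i then acc ++ [x.reverse] else acc ++ [x])
            = acc ++ [if Nat.testBit num i then x.reverse else x] from by split_ifs <;> rfl,
        ih]
      simp [List.count_cons_self, List.replicate_succ]
    · rw [if_neg h, ih, List.count_cons_of_ne h]

-- A's fold over the indexed types equals the flat concatenation of the per-type blocks.
theorem middle_fold_eq (some_box : List (List Int)) (num : Nat)
    (L : List (List Int × Nat)) (acc : List (List Int)) :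
    L.foldl (fun nbl ti =>
      some_box.foldl (fun nbl2 bj =>
        if bj = ti.1 then
          (if Nat.testBit num ti.2 then nbl2 ++ [bj.reverse] else nbl2 ++ [bj])
        else nbl2) nbl) acc
      = acc ++ L.flatMap (fun ti =>
          List.replicate (some_box.count ti.1) (if Nat.testBit num ti.2 then ti.1.reverse else ti.1)) := by
  induction L generalizing acc with
  | nil => simp
  | cons p ps ih =>
    simp only [List.foldl_cons, List.flatMap_cons]
    rw [inner_scan_eq, ih, List.append_assoc]

theorem swerve_by_group_spec_aux (some_box : List (List Int)) :
    swerve_by_group some_box = swerve_by_group_alt some_box := by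
  unfold swerve_by_group swerve_by_group_alt del_rdd
  rw [PySem.List.foldl_append_singleton_eq_map]
  simp only [List.nil_append]
  apply List.map_congr_left
  intro num _
  rw [List.zipIdx_map, List.foldl_map, PySem.List.foldl_append_eq_flatMap, middle_fold_eq]
  simp only [List.nil_append, Prod.map, id]
  apply List.flatMap_congr
  intro p _
  split_ifs <;> rfl

-- ===== VERDICT (by name: the statement is the Claim_ definition above) =====
theorem swerve_by_group_spec : Claim_equal_swerve_by_group := by
  intro some_box _
  unfold Spec_swerve_by_group
  exact swerve_by_group_spec_aux some_box
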